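-- pv_equiv track=rewrite | github.com/NaviAndrei/cli-username | username_generator/modifiers.py | apply_alt_caps
-- ===== SOURCE A (Python) =====
-- def apply_alt_caps(username: str) -> str:
--     """Alternates uppercase/lowercase on each character (CaSe StYlE).
--
--     Args:
--         username: The base username to transform.
--
--     Returns:
--         str: Username with alternating capitalization.
--     """
--     # Alternation index applies only to letters, not digits/symbols
--     result = []
--     letter_index = 0
--     for char in username:
--         if char.isalpha():
--             # Even indices are uppercase, odd are lowercase
--             result.append(char.upper() if letter_index % 2 == 0 else char.lower())
--             letter_index += 1
--         else:
--             result.append(char)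
--     return ''.join(result)
-- ===== SOURCE B (Python) =====
-- def apply_alt_caps(username: str) -> str:
--     letters = [c for c in username if c.isalpha()]
--     transformed = [c.upper() if i % 2 == 0 else c.lower() for i, c in enumerate(letters)]
--     it = iter(transformed)
--     return ''.join(next(it) if c.isalpha() else c for c in username)
-- ===== Notes on version B (the rewrite author's own statement) =====
-- stated objective: alternative
-- what changed: Replaces the manual letter_index counter loop by two phases: first filter+enumerate the alphabetic characters into a precomputed transformed-letter stream, then a second pass over the original string consumes one transformed letter per alphabetic position.
import Mathlib
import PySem

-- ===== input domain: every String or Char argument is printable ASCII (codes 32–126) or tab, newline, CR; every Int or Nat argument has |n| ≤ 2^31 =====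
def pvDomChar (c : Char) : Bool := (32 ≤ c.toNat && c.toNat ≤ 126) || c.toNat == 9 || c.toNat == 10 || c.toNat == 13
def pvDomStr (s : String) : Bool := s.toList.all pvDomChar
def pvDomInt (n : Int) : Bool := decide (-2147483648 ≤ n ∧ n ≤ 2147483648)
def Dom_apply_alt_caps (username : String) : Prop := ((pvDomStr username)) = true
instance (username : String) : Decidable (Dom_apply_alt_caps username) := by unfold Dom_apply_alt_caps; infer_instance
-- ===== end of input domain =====

-- B replaces A's manual letter_index counter loop by two phases: a precomputed
-- filter+enumerate transformed-letter stream, then a second pass over the original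
-- string consuming one transformed letter per alphabetic position (alternative, same cost).


-- ===== PORT A =====
-- the for-loop over the characters with the result list and letter_index as state
def apply_alt_caps_go : List Char → Int → List Char
  | [], _ => []
  | c :: cs, i =>
    if PySem.Chars.isalpha c then
      (if i % 2 == 0 then PySem.Chars.upperChar c else PySem.Chars.lowerChar c)
        :: apply_alt_caps_go cs (i + 1)
    else
      c :: apply_alt_caps_go cs i

def apply_alt_caps (username : String) : String :=
  String.mk (apply_alt_caps_go username.toList 0)

-- ===== PORT B =====
-- second pass: emit the next transformed letter for each alphabetic char, the original char otherwise
def apply_alt_caps_emit : List Char → List Char → List Char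
  | [], _ => []
  | c :: cs, ts =>
    if PySem.Chars.isalpha c then
      match ts with
      | t :: ts' => t :: apply_alt_caps_emit cs ts'
      | [] => []          -- unreachable: the stream has one entry per alphabetic char
    else
      c :: apply_alt_caps_emit cs ts

def apply_alt_caps_alt (username : String) : String :=
  let letters := username.toList.filter PySem.Chars.isalpha
  let transformed := (PySem.List.enumerate letters).map
    (fun p => if p.1 % 2 == 0 then PySem.Chars.upperChar p.2 else PySem.Chars.lowerChar p.2)
  String.mk (apply_alt_caps_emit username.toList transformed)

-- ===== PRECONDITION & SPEC =====
def Spec_apply_alt_caps (username : String) (out : String) : Prop := out = apply_alt_caps_alt username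
instance (username : String) (out : String) : Decidable (Spec_apply_alt_caps username out) := by unfold Spec_apply_alt_caps; infer_instance

-- ===== CLAIM (what is proved, stated in full; the proofs are below) =====
def Claim_equal_apply_alt_caps : Prop := ∀ (username : String), Dom_apply_alt_caps username → Spec_apply_alt_caps username (apply_alt_caps username)

-- ===== LEMMAS AND PROOFS =====

-- the transformed-letter stream, as a recursion with the running index
def pvTrans (i : Int) : List Char → List Char
  | [] => []
  | c :: cs =>
    (if i % 2 == 0 then PySem.Chars.upperChar c else PySem.Chars.lowerChar c) :: pvTrans (i + 1) cs

theorem pvMapEnum (ls : List Char) : ∀ (k : Int),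
    (PySem.List.enumerate ls k).map
      (fun p => if p.1 % 2 == 0 then PySem.Chars.upperChar p.2 else PySem.Chars.lowerChar p.2)
      = pvTrans k ls := by
  induction ls with
  | nil => intro k; simp [PySem.List.enumerate_nil, pvTrans]
  | cons c cs ih =>
    intro k
    rw [PySem.List.enumerate_cons, List.map_cons, ih]
    rfl

theorem pvGoEmit (cs : List Char) : ∀ (i : Int),
    apply_alt_caps_go cs i
      = apply_alt_caps_emit cs (pvTrans i (cs.filter PySem.Chars.isalpha)) := by
  induction cs with
  | nil => intro i; rfl
  | cons c cs ih =>
    intro i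
    by_cases h : PySem.Chars.isalpha c = true
    · simp [apply_alt_caps_go, apply_alt_caps_emit, h, pvTrans, ih]
    · simp [apply_alt_caps_go, apply_alt_caps_emit, h, ih]

-- ===== VERDICT (by name: the statement is the Claim_ definition above) =====
theorem apply_alt_caps_spec : Claim_equal_apply_alt_caps := by
  intro username _
  unfold Spec_apply_alt_caps apply_alt_caps apply_alt_caps_alt
  dsimp only
  rw [pvMapEnum, pvGoEmit]
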